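-- pv_equiv track=rewrite | github.com/openstack/nova | nova/virt/xenapi/vm_utils.py | get_ephemeral_disk_sizes
-- ===== SOURCE A (Python) =====
-- def get_ephemeral_disk_sizes(total_size_gb):
--     if not total_size_gb:
--         return
--
--     max_size_gb = 2000
--     if total_size_gb % 1024 == 0:
--         max_size_gb = 1024
--
--     left_to_allocate = total_size_gb
--     while left_to_allocate > 0:
--         size_gb = min(max_size_gb, left_to_allocate)
--         yield size_gb
--         left_to_allocate -= size_gb
-- ===== SOURCE B (Python) =====
-- def get_ephemeral_disk_sizes(total_size_gb):
--     if total_size_gb <= 0: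
--         return
--     max_size_gb = 1024 if total_size_gb % 1024 == 0 else 2000
--     full, rem = divmod(total_size_gb, max_size_gb)
--     for _ in range(full):
--         yield max_size_gb
--     if rem:
--         yield rem
-- ===== Notes on version B (the rewrite author's own statement) =====
-- stated objective: simpler
-- what changed: Replaced the subtractive while-loop accumulator with a single divmod: emit quotient-many full chunks via range and one remainder chunk; the guard matches A's empty output wherever the loop would not run.
import Mathlib
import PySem

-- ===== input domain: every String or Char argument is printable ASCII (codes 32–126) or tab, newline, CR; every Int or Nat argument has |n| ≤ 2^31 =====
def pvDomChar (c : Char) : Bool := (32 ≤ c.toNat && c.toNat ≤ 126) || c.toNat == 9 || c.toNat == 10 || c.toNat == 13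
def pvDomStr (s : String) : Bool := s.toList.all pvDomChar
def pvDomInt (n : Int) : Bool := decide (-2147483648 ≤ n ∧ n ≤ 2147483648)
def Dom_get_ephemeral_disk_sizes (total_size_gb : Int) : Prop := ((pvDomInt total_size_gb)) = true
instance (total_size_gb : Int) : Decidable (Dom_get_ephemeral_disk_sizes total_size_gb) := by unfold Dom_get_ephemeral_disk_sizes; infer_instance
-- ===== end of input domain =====

-- B replaces A's subtractive while-loop with one divmod (full chunks + remainder); simpler decomposition, same values.


-- ===== PORT A =====
-- while-loop of A: subtract min(max_size, left) until left <= 0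
def pvLoopA (max_size left : Int) : List Int :=
  if _h : 0 < max_size ∧ 0 < left then
    let size := min max_size left
    size :: pvLoopA max_size (left - size)
  else []
termination_by left.toNat
decreasing_by omega

def get_ephemeral_disk_sizes (total_size_gb : Int) : List Int :=
  if total_size_gb = 0 then []       -- `if not total_size_gb: return`
  else
    let max_size_gb : Int := if PySem.Int.mod total_size_gb 1024 = 0 then 1024 else 2000
    pvLoopA max_size_gb total_size_gb

-- ===== PORT B =====
def get_ephemeral_disk_sizes_alt (total_size_gb : Int) : List Int :=
  if total_size_gb ≤ 0 then []
  else
    let max_size_gb : Int := if PySem.Int.mod total_size_gb 1024 = 0 then 1024 else 2000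
    let full := PySem.Int.floordiv total_size_gb max_size_gb
    let rem := PySem.Int.mod total_size_gb max_size_gb
    List.replicate full.toNat max_size_gb ++ (if rem ≠ 0 then [rem] else [])

-- ===== PRECONDITION & SPEC =====
def Spec_get_ephemeral_disk_sizes (total_size_gb : Int) (out : List Int) : Prop := out = get_ephemeral_disk_sizes_alt total_size_gb
instance (total_size_gb : Int) (out : List Int) : Decidable (Spec_get_ephemeral_disk_sizes total_size_gb out) := by unfold Spec_get_ephemeral_disk_sizes; infer_instance

-- ===== CLAIM (what is proved, stated in full; the proofs are below) =====
def Claim_equal_get_ephemeral_disk_sizes : Prop := ∀ (total_size_gb : Int), Dom_get_ephemeral_disk_sizes total_size_gb → Spec_get_ephemeral_disk_sizes total_size_gb (get_ephemeral_disk_sizes total_size_gb)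

-- ===== LEMMAS AND PROOFS =====

-- ===== VERDICT (by name: the statement is the Claim_ definition above) =====
-- characterisation of A's loop for positive chunk size and total
theorem pvLoopA_eq (m : Int) (hm : 0 < m) : ∀ (n : Nat) (t : Int), t.toNat = n → 0 < t →
    pvLoopA m t = List.replicate (PySem.Int.floordiv t m).toNat m ++
      (if PySem.Int.mod t m ≠ 0 then [PySem.Int.mod t m] else []) := by
  intro n
  induction n using Nat.strong_induction_on with
  | _ n ih =>
    intro t hn ht
    rw [pvLoopA, dif_pos ⟨hm, ht⟩]
    rw [PySem.Int.floordiv_eq_ediv_of_pos hm, PySem.Int.mod_eq_emod_of_pos hm]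
    by_cases hle : t ≤ m
    · have hmin : min m t = t := min_eq_right hle
      simp only [hmin, sub_self]
      rw [pvLoopA, dif_neg (by omega)]
      rcases eq_or_lt_of_le hle with heq | hlt
      · subst heq
        rw [Int.ediv_self (by omega), Int.emod_self]
        simp
      · rw [Int.ediv_eq_zero_of_lt (by omega) hlt,
            Int.emod_eq_of_lt (by omega) hlt]
        simp [show t ≠ 0 by omega]
    · have hmin : min m t = m := min_eq_left (by omega)
      simp only [hmin]
      have hrec := ih (t - m).toNat (by omega) (t - m) rfl (by omega)
      rw [hrec, PySem.Int.floordiv_eq_ediv_of_pos hm, PySem.Int.mod_eq_emod_of_pos hm]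
      have hdiv : t / m = (t - m) / m + 1 := by
        have := Int.add_mul_ediv_right (t - m) 1 (by omega : m ≠ 0)
        have h2 : t - m + 1 * m = t := by ring
        rw [h2] at this
        exact this
      have hmod : t % m = (t - m) % m := by
        have := Int.add_mul_emod_self_right (a := t - m) (b := 1) (c := m)
        have h2 : t - m + 1 * m = t := by ring
        rw [h2] at this
        exact this
      have hq : 0 ≤ (t - m) / m := Int.ediv_nonneg (by omega) (by omega)
      rw [hdiv, hmod]
      have : ((t - m) / m + 1).toNat = ((t - m) / m).toNat + 1 := by omega
      rw [this, List.replicate_succ]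
      simp

theorem get_ephemeral_disk_sizes_spec : Claim_equal_get_ephemeral_disk_sizes := by
  intro t _
  unfold Spec_get_ephemeral_disk_sizes get_ephemeral_disk_sizes get_ephemeral_disk_sizes_alt
  by_cases h0 : t ≤ 0
  · have ht : t = 0 ∨ t < 0 := by omega
    rcases ht with rfl | hneg
    · simp
    · simp only [if_neg (by omega : ¬ t = 0), if_pos h0]
      rw [pvLoopA, dif_neg (by omega)]
  · rw [not_le] at h0
    simp only [if_neg (by omega : ¬ t = 0), if_neg (by omega : ¬ t ≤ 0)]
    exact pvLoopA_eq _ (by split <;> norm_num) t.toNat t rfl h0
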